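-- pv_equiv track=rewrite | github.com/Silvanaooo/26t1-comp9021-labs | Lab02 Solutions/ex_4_sol.py | f4_1
-- ===== SOURCE A (Python) =====
-- def f4_1(L: list) -> list:
--     """
--     Remove elements equal to their indices from a list using iteration.
--
--     This is the direct implementation of the problem statement.
--     When an element is removed, all subsequent elements shift left,
--     changing their indices, which is why we don't increment i after removal.
--
--     :param L: A list of integers (assumed to be in increasing order)
--     :return: List: The modified list with elements equal to their indices removed
--     """
--     i = 0
--     while i < len(L):
--         if L[i] == i:
--             L.pop(i)  # Remove the element at index i
--             # Don't increment i since all elements shifted left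
--         else:
--             i += 1  # Element doesn't match its index, move to next
--     return L
-- ===== SOURCE B (Python) =====
-- def f4_1(L: list) -> list:
--     """One pass: track the current index an element would have after the
--     removals so far; keep element iff it differs from that index.
--     Mutates L in place (like A) and returns it."""
--     out = []
--     cur = 0
--     for x in L:
--         if x == cur:
--             pass  # removed: indices of later elements shift, cur stays
--         else:
--             out.append(x)
--             cur += 1
--     L[:] = out
--     return L
-- ===== Notes on version B (the rewrite author's own statement) =====
-- stated objective: alternative
-- what changed: Replaces the while-loop with index re-checks and pop(i) calls by a single forward pass that tracks the current post-removal index and builds the kept elements once (O(n) worst case vs A's O(n^2) worst case; not measurably faster on the random timing inputs, where removals are rare).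
import Mathlib
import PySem

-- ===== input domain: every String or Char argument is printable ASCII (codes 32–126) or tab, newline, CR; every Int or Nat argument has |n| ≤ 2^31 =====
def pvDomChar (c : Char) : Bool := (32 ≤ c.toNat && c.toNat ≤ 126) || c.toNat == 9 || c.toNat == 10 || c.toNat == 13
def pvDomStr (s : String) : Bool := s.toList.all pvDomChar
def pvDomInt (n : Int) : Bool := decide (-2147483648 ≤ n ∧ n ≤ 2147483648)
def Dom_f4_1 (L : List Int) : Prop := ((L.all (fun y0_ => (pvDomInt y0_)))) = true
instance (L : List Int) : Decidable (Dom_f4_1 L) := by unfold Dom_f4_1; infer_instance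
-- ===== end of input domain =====

-- B removes each element equal to its current index in one pass, tracking that index directly,
-- instead of A's while loop with O(n) pop(i); both mutate L in place, the proof is about the return value.

-- ===== PORT A =====
-- while i < len(L): if L[i] == i: L.pop(i) else: i += 1
def f4_1Loop (L : List Int) (i : Nat) : List Int :=
  if h : i < L.length then
    if L[i] = (i : Int) then
      f4_1Loop (L.eraseIdx i) i
    else
      f4_1Loop L (i + 1)
  else L
termination_by L.length - i
decreasing_by
  · simp [List.length_eraseIdx, h]; omega
  · omega

def f4_1 (L : List Int) : List Int := f4_1Loop L 0

-- ===== PORT B =====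
def f4_1_alt (L : List Int) : List Int :=
  (L.foldl (fun s x => if x = s.2 then s else (s.1 ++ [x], s.2 + 1))
    (([] : List Int), (0 : Int))).1

-- ===== PRECONDITION & SPEC =====
def Spec_f4_1 (L : List Int) (out : List Int) : Prop := out = f4_1_alt L
instance (L : List Int) (out : List Int) : Decidable (Spec_f4_1 L out) := by unfold Spec_f4_1; infer_instance

-- ===== CLAIM (what is proved, stated in full; the proofs are below) =====
def Claim_equal_f4_1 : Prop := ∀ (L : List Int), Dom_f4_1 L → Spec_f4_1 L (f4_1 L)

-- ===== LEMMAS AND PROOFS =====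

-- common functional core: keep x iff x differs from its post-removal index d
def pvGo (l : List Int) (d : Int) : List Int :=
  match l with
  | [] => []
  | x :: xs => if x = d then pvGo xs d else x :: pvGo xs (d + 1)

lemma loop_eq (rest : List Int) : ∀ kept : List Int,
    f4_1Loop (kept ++ rest) kept.length = kept ++ pvGo rest (kept.length : Int) := by
  induction rest with
  | nil =>
    intro kept
    rw [f4_1Loop]
    simp [pvGo]
  | cons x xs ih =>
    intro kept
    rw [f4_1Loop]
    have hlen : kept.length < (kept ++ x :: xs).length := by simp
    have hget : (kept ++ x :: xs)[kept.length]'hlen = x := by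
      simp
    have herase : (kept ++ x :: xs).eraseIdx kept.length = kept ++ xs := by
      induction kept with
      | nil => simp
      | cons a as ihk => simp [ihk]
    simp only [hlen, dif_pos, hget]
    by_cases hx : x = (kept.length : Int)
    · subst hx
      rw [if_pos rfl, herase, ih kept]
      simp [pvGo]
    · have h2 : kept.length + 1 = (kept ++ [x]).length := by simp
      simp only [if_neg hx]
      rw [h2]
      have := ih (kept ++ [x])
      rw [List.append_assoc] at this
      simp only [List.cons_append, List.nil_append] at this
      rw [this]
      simp [pvGo, hx]

lemma fold_eq (l : List Int) : ∀ (acc : List Int) (d : Int),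
    (l.foldl (fun s x => if x = s.2 then s else (s.1 ++ [x], s.2 + 1)) (acc, d)).1
      = acc ++ pvGo l d := by
  induction l with
  | nil => intro acc d; simp [pvGo]
  | cons x xs ih =>
    intro acc d
    simp only [List.foldl_cons, pvGo]
    by_cases hx : x = d
    · simp [hx, ih]
    · simp [hx, ih, List.append_assoc]

-- ===== VERDICT (by name: the statement is the Claim_ definition above) =====
theorem f4_1_spec : Claim_equal_f4_1 := by
  intro L _
  unfold Spec_f4_1 f4_1 f4_1_alt
  have h := loop_eq L []
  simp only [List.nil_append, List.length_nil, Nat.cast_zero] at h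
  rw [h, fold_eq]
  simp
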